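-- pv_equiv track=rewrite | github.com/kaluginpeter/Algorithms_and_structures_tasks | Python_Solutions/CodeWars/7kyu/Esthetic_Numbers.py | esthetic
-- ===== SOURCE A (Python) =====
-- def esthetic(num):
--     ans: list[int] = list()
--     for i in range(2, 11):
--         top: list[int] = list()
--         x: int = num
--         while x:
--             top.append(x % i)
--             x //= i
--         if all(abs(x - y) == 1 for x, y in zip(top, top[1:])):
--             ans.append(i)
--     return ans
-- ===== SOURCE B (Python) =====
-- def esthetic(num):
--     # Different algorithm: instead of extracting num's digits base-by-base,
--     # generate (BFS, most-significant digit first) all esthetic numbers <= num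
--     # in each base and test whether num is one of them.
--     ans = []
--     for base in range(2, 11):
--         if num < base:
--             ans.append(base)
--             continue
--         found = False
--         frontier = [(d, d) for d in range(1, base)]
--         while frontier and not found:
--             nxt = []
--             for v, d in frontier:
--                 for nd in (d - 1, d + 1):
--                     if 0 <= nd < base:
--                         nv = v * base + nd
--                         if nv == num:
--                             found = True
--                         elif nv < num:
--                             nxt.append((nv, nd))
--             frontier = nxt
--         if found:
--             ans.append(base)
--     return ans
-- ===== Notes on version B (the rewrite author's own statement) =====
-- stated objective: alternative
-- what changed: B tests each base by forward BFS generation: it enumerates all esthetic numbers <= num in that base (extending values most-significant-digit-first by v*base+(d±1)) and checks whether num is produced, instead of A's extraction of num's digits with mod//div and a pairwise scan.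
import Mathlib
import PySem

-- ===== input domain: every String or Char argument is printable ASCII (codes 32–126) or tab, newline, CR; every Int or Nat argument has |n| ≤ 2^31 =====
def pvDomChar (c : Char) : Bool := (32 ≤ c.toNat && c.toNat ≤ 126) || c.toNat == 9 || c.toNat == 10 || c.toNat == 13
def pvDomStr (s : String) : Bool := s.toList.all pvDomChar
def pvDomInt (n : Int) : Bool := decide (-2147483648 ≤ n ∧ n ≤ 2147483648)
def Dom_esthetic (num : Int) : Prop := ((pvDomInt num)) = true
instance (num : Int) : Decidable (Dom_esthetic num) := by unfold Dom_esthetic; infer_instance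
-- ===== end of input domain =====

-- B replaces A's per-base digit extraction (mod/div then pairwise scan) with forward BFS
-- generation of all esthetic numbers ≤ num in that base, testing whether num is produced
-- (alternative algorithm, not faster).

-- ===== PORT A =====
-- the 'while x: top.append(x % i); x //= i' loop, fuel-bounded (exact for x ≥ 0 with fuel ≥ x.toNat)
def digitsA (i : Int) : Nat → Int → List Int
  | 0, _ => []
  | fuel + 1, x =>
    if x ≠ 0 then PySem.Int.mod x i :: digitsA i fuel (PySem.Int.floordiv x i) else []

def esthetic (num : Int) : List Int :=
  (PySem.List.pyRange 2 11 1).foldl (fun ans i =>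
    let top := digitsA i num.toNat num
    if (top.zip (top.drop 1)).all (fun p => (p.1 - p.2).natAbs == 1) then ans ++ [i] else ans) []

-- ===== PORT B =====
-- one candidate child digit nd of frontier entry (v, d): the 'if 0 <= nd < base: …' body
def childB (i num : Int) (acc : Bool × List (Int × Int)) (v nd : Int) : Bool × List (Int × Int) :=
  if 0 ≤ nd ∧ nd < i then
    if v * i + nd = num then (true, acc.2)
    else if v * i + nd < num then (acc.1, acc.2 ++ [(v * i + nd, nd)])
    else acc
  else acc

-- one pass of the inner 'for v, d in frontier: for nd in (d-1, d+1): …' loops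
def stepB (i num : Int) (F : List (Int × Int)) : Bool × List (Int × Int) :=
  F.foldl (fun acc p => childB i num (childB i num acc p.1 (p.2 - 1)) p.1 (p.2 + 1)) (false, [])

-- the 'while frontier and not found' loop, fuel-bounded (exact wherever the Python loop ends)
def loopB (i num : Int) : Nat → Bool → List (Int × Int) → Bool
  | 0, found, _ => found
  | fuel + 1, found, F =>
    if F ≠ [] ∧ found = false then
      let s := stepB i num F
      loopB i num fuel s.1 s.2
    else found

def esthetic_alt (num : Int) : List Int :=
  (PySem.List.pyRange 2 11 1).foldl (fun ans i =>
    if num < i then ans ++ [i]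
    else if loopB i num num.toNat false ((PySem.List.pyRange 1 i 1).map (fun d => (d, d))) then
      ans ++ [i]
    else ans) []

-- ===== PRECONDITION & SPEC =====
-- A's 'while x' loop never terminates for negative num (x //= i stalls at -1), so Python A
-- returns on exactly the nonnegative inputs; Pre_ excludes only the inputs where A diverges.
def Pre_esthetic (num : Int) : Prop := 0 ≤ num
instance (num : Int) : Decidable (Pre_esthetic num) := by unfold Pre_esthetic; infer_instance
def pvWitness_esthetic : Int := (5)

def Spec_esthetic (num : Int) (out : List Int) : Prop := out = esthetic_alt num
instance (num : Int) (out : List Int) : Decidable (Spec_esthetic num out) := by unfold Spec_esthetic; infer_instance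

-- ===== CLAIM (what is proved, stated in full; the proofs are below) =====
def Claim_equal_esthetic : Prop := ∀ (num : Int), Dom_esthetic num → Pre_esthetic num → Spec_esthetic num (esthetic num)

-- ===== LEMMAS AND PROOFS =====

-- canonical base-i digits of x, least significant first (proof device)
def digitsC (i x : Int) : List Int :=
  if h : 0 < x ∧ 2 ≤ i then x % i :: digitsC i (x / i) else []
termination_by x.toNat
decreasing_by
  have h1 : 0 < x := h.1
  have h2 : 2 ≤ i := h.2
  have hlt : x / i < x := Int.ediv_lt_of_lt_mul (by omega) (by nlinarith)
  have hge : 0 ≤ x / i := Int.ediv_nonneg (by omega) (by omega)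
  omega

def adjOk (t : List Int) : Bool := (t.zip (t.drop 1)).all (fun p => (p.1 - p.2).natAbs == 1)

-- the frontier invariant: value positive, below num, paired with its own last digit, esthetic
def InvP (i num : Int) (p : Int × Int) : Prop :=
  1 ≤ p.1 ∧ p.1 < num ∧ p.2 = p.1 % i ∧ adjOk (digitsC i p.1) = true

lemma digitsC_pos {i x : Int} (hx : 0 < x) (hi : 2 ≤ i) :
    digitsC i x = x % i :: digitsC i (x / i) := by
  rw [digitsC]; simp [hx, hi]

lemma digitsC_nonpos {i x : Int} (hx : x ≤ 0) : digitsC i x = [] := by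
  rw [digitsC]; simp; omega

lemma digitsC_single {i x : Int} (hx : 0 < x) (hxi : x < i) (hi : 2 ≤ i) :
    digitsC i x = [x] := by
  rw [digitsC_pos hx hi, Int.emod_eq_of_lt (by omega) hxi,
    Int.ediv_eq_zero_of_lt (by omega) hxi, digitsC_nonpos le_rfl]

lemma ediv_lt_self' {i x : Int} (hx : 0 < x) (hi : 2 ≤ i) : x / i < x :=
  Int.ediv_lt_of_lt_mul (by omega) (by nlinarith)

lemma digitsA_eq_digitsC {i : Int} (hi : 2 ≤ i) :
    ∀ (fuel : Nat) (x : Int), 0 ≤ x → x.toNat ≤ fuel → digitsA i fuel x = digitsC i x := by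
  intro fuel
  induction fuel with
  | zero =>
    intro x hx hf
    have hx0 : x = 0 := by omega
    simp [digitsA, hx0, digitsC_nonpos le_rfl]
  | succ n ih =>
    intro x hx hf
    by_cases h : x = 0
    · simp [digitsA, h, digitsC_nonpos le_rfl]
    · have hx0 : 0 < x := by omega
      have hqn : 0 ≤ x / i := Int.ediv_nonneg (by omega) (by omega)
      have hql : x / i < x := ediv_lt_self' hx0 hi
      rw [digitsA]
      simp only [h, ne_eq, not_false_eq_true, if_true]
      rw [PySem.Int.mod_eq_emod_of_pos (by omega), PySem.Int.floordiv_eq_ediv_of_pos (by omega),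
        digitsC_pos hx0 hi, ih (x / i) hqn (by omega)]

lemma digitsC_child {i v nd : Int} (hi : 2 ≤ i) (hv : 1 ≤ v) (h0 : 0 ≤ nd) (h1 : nd < i) :
    digitsC i (v * i + nd) = nd :: digitsC i v := by
  have hpos : 0 < v * i + nd := by nlinarith
  rw [digitsC_pos hpos hi, show v * i + nd = nd + i * v by ring, Int.add_mul_emod_self_left,
    Int.emod_eq_of_lt h0 h1, Int.add_mul_ediv_left _ _ (by omega : i ≠ 0),
    Int.ediv_eq_zero_of_lt h0 h1, zero_add]

lemma adjOk_cons_cons (a b : Int) (t : List Int) :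
    adjOk (a :: b :: t) = ((a - b).natAbs == 1 && adjOk (b :: t)) := by
  simp [adjOk]

-- the esthetic check on the digits of a child value v*i+nd, nd adjacent to v's last digit
lemma adjOk_child {i v nd : Int} (hi : 2 ≤ i) (hv : 1 ≤ v) (h0 : 0 ≤ nd) (h1 : nd < i)
    (hadj : (nd - v % i).natAbs = 1) (hok : adjOk (digitsC i v) = true) :
    adjOk (digitsC i (v * i + nd)) = true := by
  rw [digitsC_child hi hv h0 h1]
  rw [digitsC_pos (by omega) hi] at hok ⊢
  rw [adjOk_cons_cons]
  simp [hadj, hok]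

-- ---- B-side step lemmas ----

lemma childB_mono {i num : Int} (acc : Bool × List (Int × Int)) (v nd : Int) :
    (acc.1 = true → (childB i num acc v nd).1 = true) ∧
    (∀ q ∈ acc.2, q ∈ (childB i num acc v nd).2) := by
  unfold childB; split_ifs <;> simp_all

lemma childB_sound {i num : Int} (hi : 2 ≤ i) (acc : Bool × List (Int × Int)) {v d nd : Int}
    (hv : InvP i num (v, d)) (hnd : nd = d - 1 ∨ nd = d + 1) :
    ((childB i num acc v nd).1 = true → acc.1 = true ∨ adjOk (digitsC i num) = true) ∧
    (∀ q ∈ (childB i num acc v nd).2, q ∈ acc.2 ∨ InvP i num q) := by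
  obtain ⟨hv1, hvlt, hvd, hvok⟩ := hv
  simp only at hv1 hvlt hvd hvok
  unfold childB
  split_ifs with h1 h2 h3
  · -- v*i+nd = num : found
    refine ⟨fun _ => Or.inr ?_, fun q hq => Or.inl hq⟩
    have hadj : (nd - v % i).natAbs = 1 := by omega
    rw [← h2]
    exact adjOk_child hi hv1 h1.1 h1.2 hadj hvok
  · -- v*i+nd < num : appended
    refine ⟨fun h => Or.inl h, fun q hq => ?_⟩
    rcases List.mem_append.1 hq with h | h
    · exact Or.inl h
    · simp at h
      subst h
      refine Or.inr ⟨by nlinarith, h3, ?_, ?_⟩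
      · simp only
        rw [show v * i + nd = nd + i * v by ring, Int.add_mul_emod_self_left,
          Int.emod_eq_of_lt h1.1 h1.2]
      · have hadj : (nd - v % i).natAbs = 1 := by omega
        exact adjOk_child hi hv1 h1.1 h1.2 hadj hvok
  · exact ⟨fun h => Or.inl h, fun q hq => Or.inl hq⟩
  · exact ⟨fun h => Or.inl h, fun q hq => Or.inl hq⟩

lemma childB_find {i num : Int} (acc : Bool × List (Int × Int)) {v nd : Int}
    (h0 : 0 ≤ nd) (h1 : nd < i) (heq : v * i + nd = num) :
    (childB i num acc v nd).1 = true := by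
  unfold childB; simp [h0, h1, heq]

lemma childB_mem {i num : Int} (acc : Bool × List (Int × Int)) {v nd : Int}
    (h0 : 0 ≤ nd) (h1 : nd < i) (hlt : v * i + nd < num) :
    (v * i + nd, nd) ∈ (childB i num acc v nd).2 := by
  unfold childB
  rw [if_pos ⟨h0, h1⟩, if_neg (by omega : ¬ v * i + nd = num), if_pos hlt]
  simp

-- the body of stepB's fold, named
def gB (i num : Int) (acc : Bool × List (Int × Int)) (p : Int × Int) : Bool × List (Int × Int) :=
  childB i num (childB i num acc p.1 (p.2 - 1)) p.1 (p.2 + 1)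

lemma stepB_eq (i num : Int) (F : List (Int × Int)) :
    stepB i num F = F.foldl (gB i num) (false, []) := rfl

lemma foldlB_mono {i num : Int} :
    ∀ (F : List (Int × Int)) (acc : Bool × List (Int × Int)),
      (acc.1 = true → (F.foldl (gB i num) acc).1 = true) ∧
      (∀ q ∈ acc.2, q ∈ (F.foldl (gB i num) acc).2) := by
  intro F
  induction F with
  | nil => intro acc; simp
  | cons p F ih =>
    intro acc
    simp only [List.foldl_cons]
    have hg1 := childB_mono (i := i) (num := num) acc p.1 (p.2 - 1)
    have hg2 := childB_mono (i := i) (num := num) (childB i num acc p.1 (p.2 - 1)) p.1 (p.2 + 1)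
    have hrest := ih (gB i num acc p)
    refine ⟨fun h => hrest.1 ?_, fun q hq => hrest.2 q ?_⟩
    · exact hg2.1 (hg1.1 h)
    · exact hg2.2 q (hg1.2 q hq)

lemma foldlB_sound {i num : Int} (hi : 2 ≤ i) :
    ∀ (F : List (Int × Int)) (acc : Bool × List (Int × Int)),
      (∀ p ∈ F, InvP i num p) →
      (acc.1 = true → adjOk (digitsC i num) = true) →
      (∀ q ∈ acc.2, InvP i num q) →
      ((F.foldl (gB i num) acc).1 = true → adjOk (digitsC i num) = true) ∧
      (∀ q ∈ (F.foldl (gB i num) acc).2, InvP i num q) := by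
  intro F
  induction F with
  | nil => intro acc _ h1 h2; simp only [List.foldl_nil]; exact ⟨h1, h2⟩
  | cons p F ih =>
    intro acc hF h1 h2
    simp only [List.foldl_cons]
    have hp : InvP i num (p.1, p.2) := hF p (List.mem_cons_self)
    have hc1 := childB_sound hi acc hp (Or.inl rfl)
    have hc2 := childB_sound hi (childB i num acc p.1 (p.2 - 1)) hp (Or.inr rfl)
    refine ih (gB i num acc p) (fun q hq => hF q (List.mem_cons_of_mem _ hq)) ?_ ?_
    · intro h
      rcases hc2.1 h with h' | h'
      · rcases hc1.1 h' with h'' | h''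
        · exact h1 h''
        · exact h''
      · exact h'
    · intro q hq
      rcases hc2.2 q hq with h' | h'
      · rcases hc1.2 q h' with h'' | h''
        · exact h2 q h''
        · exact h''
      · exact h'

lemma stepB_sound {i num : Int} (hi : 2 ≤ i) {F : List (Int × Int)}
    (hF : ∀ p ∈ F, InvP i num p) :
    ((stepB i num F).1 = true → adjOk (digitsC i num) = true) ∧
    (∀ q ∈ (stepB i num F).2, InvP i num q) := by
  rw [stepB_eq]
  exact foldlB_sound hi F (false, []) hF (by simp) (by simp)

lemma foldlB_find {i num : Int} {v d nd : Int}
    (hnd : nd = d - 1 ∨ nd = d + 1) (h0 : 0 ≤ nd) (h1 : nd < i) (heq : v * i + nd = num) :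
    ∀ (F : List (Int × Int)) (acc : Bool × List (Int × Int)), (v, d) ∈ F →
      (F.foldl (gB i num) acc).1 = true := by
  intro F
  induction F with
  | nil => intro acc h; simp at h
  | cons p F ih =>
    intro acc hmem
    simp only [List.foldl_cons]
    rcases List.mem_cons.1 hmem with h | h
    · apply (foldlB_mono F _).1
      rw [← h]
      unfold gB
      simp only
      rcases hnd with hl | hr
      · subst hl
        exact (childB_mono _ _ _).1 (childB_find acc h0 h1 heq)
      · subst hr
        exact childB_find _ h0 h1 heq
    · exact ih _ h

lemma foldlB_mem {i num : Int} {v d nd : Int}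
    (hnd : nd = d - 1 ∨ nd = d + 1) (h0 : 0 ≤ nd) (h1 : nd < i) (hlt : v * i + nd < num) :
    ∀ (F : List (Int × Int)) (acc : Bool × List (Int × Int)), (v, d) ∈ F →
      (v * i + nd, nd) ∈ (F.foldl (gB i num) acc).2 := by
  intro F
  induction F with
  | nil => intro acc h; simp at h
  | cons p F ih =>
    intro acc hmem
    simp only [List.foldl_cons]
    rcases List.mem_cons.1 hmem with h | h
    · apply (foldlB_mono F _).2
      rw [← h]
      unfold gB
      simp only
      rcases hnd with hl | hr
      · subst hl
        exact (childB_mono _ _ _).2 _ (childB_mem acc h0 h1 hlt)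
      · subst hr
        exact childB_mem _ h0 h1 hlt
    · exact ih _ h

-- ---- loop lemmas ----

lemma loopB_true (i num : Int) : ∀ (fuel : Nat) (F : List (Int × Int)),
    loopB i num fuel true F = true := by
  intro fuel F; cases fuel <;> simp [loopB]

lemma loopB_sound {i num : Int} (hi : 2 ≤ i) :
    ∀ (fuel : Nat) (F : List (Int × Int)), (∀ p ∈ F, InvP i num p) →
      loopB i num fuel false F = true → adjOk (digitsC i num) = true := by
  intro fuel
  induction fuel with
  | zero => intro F _ h; simp [loopB] at h
  | succ n ih =>
    intro F hF h
    rw [loopB] at h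
    by_cases hFe : F = []
    · simp [hFe] at h
    · simp only [hFe, ne_eq, not_false_eq_true, true_and, if_true] at h
      have hs := stepB_sound hi hF
      cases hb : (stepB i num F).1 with
      | true => exact hs.1 hb
      | false =>
        rw [hb] at h
        exact ih _ hs.2 h

-- adjacency of digits k and k+1 of num (digit k = num / i^k % i), read off adjOk
lemma adjOk_drop_one {t : List Int} (h : adjOk t = true) : adjOk (t.drop 1) = true := by
  cases t with
  | nil => simpa using h
  | cons a t =>
    cases t with
    | nil => simp [adjOk]
    | cons b t =>
      rw [adjOk_cons_cons] at h
      simpa using (Bool.and_elim_right h)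

lemma adjOk_drop (j : Nat) : ∀ {t : List Int}, adjOk t = true → adjOk (t.drop j) = true := by
  induction j with
  | zero => intro t h; simpa using h
  | succ m ih =>
    intro t h
    have h2 := ih (adjOk_drop_one h)
    rw [List.drop_drop] at h2
    rw [show 1 + m = m + 1 by omega] at h2
    exact h2

lemma digitsC_drop {i : Int} (hi : 2 ≤ i) :
    ∀ (j : Nat) (x : Int), 0 ≤ x → (digitsC i x).drop j = digitsC i (x / i ^ j) := by
  intro j
  induction j with
  | zero => intro x hx; simp
  | succ m ih =>
    intro x hx
    by_cases hx0 : x = 0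
    · simp [hx0, digitsC_nonpos le_rfl, Int.zero_ediv]
    · have hpos : 0 < x := by omega
      rw [digitsC_pos hpos hi, show m + 1 = 1 + m by omega, ← List.drop_drop, List.drop_one]
      simp only [List.tail_cons]
      rw [ih (x / i) (Int.ediv_nonneg (by omega) (by omega)),
        Int.ediv_ediv_eq_ediv_mul (by omega : (0:Int) ≤ i), ← pow_succ', show i ^ (1 + m) = i ^ (m + 1) by ring]

lemma adjOk_digits_at {i num : Int} (hi : 2 ≤ i) (hnum : 0 ≤ num)
    (hE : adjOk (digitsC i num) = true) {k : Nat} (hk : 0 < num / i ^ (k + 1)) :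
    (num / i ^ k % i - num / i ^ (k + 1) % i).natAbs = 1 := by
  have hy : num / i ^ k / i = num / i ^ (k + 1) := by
    rw [Int.ediv_ediv_eq_ediv_mul (by positivity : (0:Int) ≤ i ^ k), ← pow_succ]
  have hyi : 0 < num / i ^ k / i := by rw [hy]; exact hk
  have hypos : 0 < num / i ^ k := by
    by_contra hcon
    push_neg at hcon
    have : num / i ^ k / i ≤ 0 / i := Int.ediv_le_ediv (by omega) hcon
    simp at this
    omega
  have hd : adjOk (digitsC i (num / i ^ k)) = true := by
    rw [← digitsC_drop hi k num hnum]
    exact adjOk_drop k hE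
  rw [digitsC_pos hypos hi, hy, digitsC_pos hk hi, adjOk_cons_cons] at hd
  have := Bool.and_elim_left hd
  simpa using this

-- ---- loop completeness ----

lemma ediv_pow_lt {i num : Int} (hi : 2 ≤ i) (hnum : 2 ≤ num) {j : Nat}
    (hq : 2 ≤ num / i ^ (j + 1)) : num / i ^ (j + 1) < num := by
  have hp : (0:Int) < i ^ (j + 1) := by positivity
  have hp2 : (2:Int) ≤ i ^ (j + 1) := by
    calc (2:Int) ≤ i := hi
    _ = i ^ 1 := (pow_one i).symm
    _ ≤ i ^ (j + 1) := pow_le_pow_right₀ (by omega) (by omega)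
  have hmul : num / i ^ (j + 1) * i ^ (j + 1) ≤ num := by
    have h1 := Int.mul_ediv_add_emod num (i ^ (j + 1))
    have h2 := Int.emod_nonneg num (by omega : i ^ (j + 1) ≠ 0)
    nlinarith
  nlinarith

lemma loopB_complete {i num : Int} (hi : 2 ≤ i) (hnum : i ≤ num)
    (hE : adjOk (digitsC i num) = true) :
    ∀ (k fuel : Nat) (F : List (Int × Int)), k + 1 ≤ fuel →
      0 < num / i ^ (k + 1) →
      (num / i ^ (k + 1), num / i ^ (k + 1) % i) ∈ F →
      loopB i num fuel false F = true := by
  intro k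
  induction k with
  | zero =>
    intro fuel F hf hp hm
    obtain ⟨f, rfl⟩ : ∃ f, fuel = f + 1 := ⟨fuel - 1, by omega⟩
    rw [loopB, if_pos ⟨List.ne_nil_of_mem hm, rfl⟩]
    have hadj := adjOk_digits_at hi (by omega) hE (k := 0) hp
    rw [pow_zero, Int.ediv_one] at hadj
    have h0 : 0 ≤ num % i := Int.emod_nonneg num (by omega)
    have h1 : num % i < i := Int.emod_lt_of_pos num (by omega)
    have heq : num / i ^ (0 + 1) * i + num % i = num := by
      have h := Int.mul_ediv_add_emod num i
      rw [pow_succ, pow_zero, one_mul]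
      linarith [h]
    have hnd : num % i = num / i ^ (0 + 1) % i - 1 ∨ num % i = num / i ^ (0 + 1) % i + 1 := by
      omega
    have hfind := foldlB_find hnd h0 h1 heq F (false, []) hm
    rw [← stepB_eq] at hfind
    show loopB i num f (stepB i num F).1 (stepB i num F).2 = true
    rw [hfind]
    exact loopB_true i num f _
  | succ m ih =>
    intro fuel F hf hp hm
    obtain ⟨f, rfl⟩ : ∃ f, fuel = f + 1 := ⟨fuel - 1, by omega⟩
    rw [loopB, if_pos ⟨List.ne_nil_of_mem hm, rfl⟩]
    -- v = num / i^(m+2) (in frontier), extend by nd = digit m+1 of num to nv = num / i^(m+1)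
    have hadj := adjOk_digits_at hi (by omega) hE (k := m + 1) hp
    have h0 : 0 ≤ num / i ^ (m + 1) % i := Int.emod_nonneg _ (by omega)
    have h1 : num / i ^ (m + 1) % i < i := Int.emod_lt_of_pos _ (by omega)
    have hyy : num / i ^ (m + 1) / i = num / i ^ (m + 1 + 1) := by
      rw [Int.ediv_ediv_eq_ediv_mul (by positivity : (0:Int) ≤ i ^ (m + 1)), ← pow_succ]
    have heq : num / i ^ (m + 1 + 1) * i + num / i ^ (m + 1) % i = num / i ^ (m + 1) := by
      have h := Int.mul_ediv_add_emod (num / i ^ (m + 1)) i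
      rw [← hyy]
      linarith [h]
    have hnd : num / i ^ (m + 1) % i = num / i ^ (m + 1 + 1) % i - 1 ∨
        num / i ^ (m + 1) % i = num / i ^ (m + 1 + 1) % i + 1 := by
      omega
    have hnv2 : 2 ≤ num / i ^ (m + 1) := by
      rw [← heq]
      have h1i := mul_le_mul_of_nonneg_right (by omega : (1:Int) ≤ num / i ^ (m + 1 + 1))
        (by omega : (0:Int) ≤ i)
      rw [one_mul] at h1i
      linarith
    have hlt : num / i ^ (m + 1 + 1) * i + num / i ^ (m + 1) % i < num := by
      rw [heq]
      exact ediv_pow_lt hi (by omega) hnv2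
    have hmem := foldlB_mem hnd h0 h1 hlt F (false, []) hm
    rw [← stepB_eq] at hmem
    show loopB i num f (stepB i num F).1 (stepB i num F).2 = true
    cases hs : (stepB i num F).1 with
    | true => exact loopB_true i num f _
    | false =>
      apply ih f _ (by omega) (by omega)
      rw [heq] at hmem
      have hndmod : num / i ^ (m + 1) % i = num / i ^ (m + 1) % i := rfl
      -- the pair stored is (nv, nd) with nd = nv % i
      have : (num / i ^ (m + 1), num / i ^ (m + 1) % i) ∈ (stepB i num F).2 := by
        have hx : num / i ^ (m + 1) % i = num / i ^ (m + 1) % i := rfl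
        exact hmem
      exact this

-- ---- the per-base equivalence and the final assembly ----

lemma startF_inv {i num : Int} (hi : 2 ≤ i) (hnum : i ≤ num) :
    ∀ p ∈ (PySem.List.pyRange 1 i 1).map (fun d => (d, d)), InvP i num p := by
  intro p hp
  rcases List.mem_map.1 hp with ⟨d, hd, rfl⟩
  rw [PySem.List.mem_pyRange_one] at hd
  refine ⟨by omega, by omega, ?_, ?_⟩
  · exact (Int.emod_eq_of_lt (by omega) (by omega)).symm
  · rw [digitsC_single (by omega) (by omega) hi]; simp [adjOk]

lemma loopB_eq_adjOk {i num : Int} (hi : 2 ≤ i) (hnum : i ≤ num) :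
    loopB i num num.toNat false ((PySem.List.pyRange 1 i 1).map (fun d => (d, d))) =
      adjOk (digitsC i num) := by
  cases hE : adjOk (digitsC i num) with
  | false =>
    cases hl : loopB i num num.toNat false ((PySem.List.pyRange 1 i 1).map (fun d => (d, d))) with
    | false => rfl
    | true =>
      have := loopB_sound hi num.toNat _ (startF_inv hi hnum) hl
      rw [this] at hE
      exact absurd hE (by simp)
  | true =>
    set L := Nat.log i.toNat num.toNat with hLdef
    have hb2 : 1 < i.toNat := by omega
    have hm0 : num.toNat ≠ 0 := by omega
    have hL1 : 0 < L := Nat.log_pos hb2 (by omega)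
    have hlow : (i : Int) ^ L ≤ num := by
      have h := Nat.pow_log_le_self i.toNat hm0
      have := (Int.toNat_of_nonneg (by omega : (0:Int) ≤ i))
      calc (i:Int) ^ L = ((i.toNat : Int)) ^ L := by rw [this]
      _ = ((i.toNat ^ L : Nat) : Int) := by push_cast; ring
      _ ≤ ((num.toNat : Nat) : Int) := by exact_mod_cast h
      _ = num := Int.toNat_of_nonneg (by omega)
    have hhigh : num < (i : Int) ^ (L + 1) := by
      have h := Nat.lt_pow_succ_log_self hb2 num.toNat
      have hcast := (Int.toNat_of_nonneg (by omega : (0:Int) ≤ i))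
      calc num = ((num.toNat : Nat) : Int) := (Int.toNat_of_nonneg (by omega)).symm
      _ < ((i.toNat ^ (L + 1) : Nat) : Int) := by exact_mod_cast h
      _ = ((i.toNat : Int)) ^ (L + 1) := by push_cast; ring
      _ = (i : Int) ^ (L + 1) := by rw [hcast]
    have hpow : (0:Int) < i ^ L := by positivity
    have hv1 : 1 ≤ num / i ^ L := (Int.le_ediv_iff_mul_le hpow).2 (by omega)
    have hvi : num / i ^ L < i := (Int.ediv_lt_iff_lt_mul hpow).2 (by rw [mul_comm, ← pow_succ]; exact hhigh)
    have hk : L - 1 + 1 = L := by omega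
    apply loopB_complete hi hnum hE (L - 1) num.toNat _ _ (by rw [hk]; omega)
    · rw [hk]
      apply List.mem_map.2
      refine ⟨num / i ^ L, ?_, ?_⟩
      · rw [PySem.List.mem_pyRange_one]; omega
      · rw [Int.emod_eq_of_lt (by omega) hvi]
    · have := Nat.log_le_self i.toNat num.toNat
      omega

lemma base_body_eq {i num : Int} (hi : 2 ≤ i) (hnum : 0 ≤ num) (ans : List Int) :
    (if ((digitsA i num.toNat num).zip ((digitsA i num.toNat num).drop 1)).all
        (fun p => (p.1 - p.2).natAbs == 1) then ans ++ [i] else ans) =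
    (if num < i then ans ++ [i]
     else if loopB i num num.toNat false ((PySem.List.pyRange 1 i 1).map (fun d => (d, d))) then
       ans ++ [i]
     else ans) := by
  have hA : ((digitsA i num.toNat num).zip ((digitsA i num.toNat num).drop 1)).all
      (fun p => (p.1 - p.2).natAbs == 1) = adjOk (digitsC i num) := by
    rw [adjOk, digitsA_eq_digitsC hi num.toNat num hnum le_rfl]
  rw [hA]
  by_cases hlt : num < i
  · have hsm : adjOk (digitsC i num) = true := by
      by_cases h0 : num = 0
      · rw [h0, digitsC_nonpos le_rfl]; simp [adjOk]
      · rw [digitsC_single (by omega) hlt hi]; simp [adjOk]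
    rw [hsm, if_pos hlt]
    simp
  · rw [if_neg hlt, loopB_eq_adjOk hi (by omega)]

-- ===== VERDICT (by name: the statement is the Claim_ definition above) =====
theorem esthetic_spec : Claim_equal_esthetic := by
  intro num hdom hpre
  unfold Spec_esthetic esthetic esthetic_alt
  apply PySem.List.foldl_congr_mem
  intro ans i hmem
  rw [PySem.List.mem_pyRange_one] at hmem
  exact base_body_eq (by omega) hpre ans
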